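-- pv_equiv track=rewrite | github.com/ndulchinos/LispInterpreter | parse.py | get_next_tok
-- ===== SOURCE A (Python) =====
-- def get_next_tok(input, pos):
-- #return the position of next space/new line
--     white_space = [' ', '\n', ')', ';']
--     while pos<len(input):
--         cur_char = input[pos]
--         for i in white_space:
--             if cur_char == i:
--                 return pos
--         pos += 1
--     return -1
-- ===== SOURCE B (Python) =====
-- def get_next_tok(input, pos):
--     hits = [p for p in (input.find(d, pos) for d in [' ', '\n', ')', ';']) if p != -1]
--     return min(hits) if hits else -1
-- ===== Notes on version B (the rewrite author's own statement) =====
-- stated objective: faster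
-- what changed: A scans character by character from pos testing each against the delimiter list; B instead issues one str.find(d, pos) per delimiter and returns the minimum of the non-(-1) results (-1 if none), replacing the interpreted per-character position loop by four C-implemented library scans (measurably faster by a constant factor).
-- intended difference: On -len(input) <= pos < 0 with a delimiter present in input, A's negative-index wraparound returns a negative position (or rescans the prefix after reaching index 0), while B returns the non-negative index of the first delimiter at or after len(input)+pos (or -1), which is the intended value for a position-returning scanner. — e.g. on get_next_tok(") ", -2): A returns -2, B returns 0
import Mathlib
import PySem

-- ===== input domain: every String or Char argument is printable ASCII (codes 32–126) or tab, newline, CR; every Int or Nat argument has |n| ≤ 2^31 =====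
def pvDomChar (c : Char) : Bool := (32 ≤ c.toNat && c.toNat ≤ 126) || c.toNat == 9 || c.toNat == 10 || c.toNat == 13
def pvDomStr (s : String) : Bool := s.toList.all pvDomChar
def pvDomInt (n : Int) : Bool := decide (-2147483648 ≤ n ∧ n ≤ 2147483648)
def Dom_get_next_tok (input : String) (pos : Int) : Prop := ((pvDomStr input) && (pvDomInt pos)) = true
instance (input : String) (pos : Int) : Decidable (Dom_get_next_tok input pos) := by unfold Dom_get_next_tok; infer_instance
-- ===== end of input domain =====

-- B replaces A's char-by-char scan by four str.find library scans (one per delimiter) whose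
-- non-(-1) results are minimised (idiomatic); equivalence of the return value is claimed
-- outside D_get_next_tok (negative pos with a delimiter present), see the D_ comment below.

-- ===== PORT A =====
def pvWhiteSpace : List Char := [' ', '\n', ')', ';']

-- A's 'while pos < len(input)' loop; pyGet? = none is Python's IndexError (outside Pre_)
def pvALoop (input : List Char) (pos : Int) : Int :=
  if _h : pos < (input.length : Int) then
    match PySem.List.pyGet? input pos with
    | none => -2   -- IndexError in Python; unreachable under Pre_get_next_tok
    | some cur_char =>
      if pvWhiteSpace.any (fun i => cur_char == i) then pos
      else pvALoop input (pos + 1)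
  else -1
termination_by ((input.length : Int) - pos).toNat
decreasing_by omega

def get_next_tok (input : String) (pos : Int) : Int := pvALoop input.toList pos

-- ===== PORT B =====
def get_next_tok_alt (input : String) (pos : Int) : Int :=
  let hits := ([' ', '\n', ')', ';'].map
      (fun d => PySem.Str.findFrom input (String.ofList [d]) pos)).filter (fun p => p != -1)
  match PySem.List.min? hits id with
  | some m => m
  | none => -1

-- ===== PRECONDITION & SPEC =====
-- Pre_ excludes only pos < -len(input), where A raises IndexError (input[pos] out of range).
def Pre_get_next_tok (input : String) (pos : Int) : Prop :=
  -(input.toList.length : Int) ≤ pos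
instance (input : String) (pos : Int) : Decidable (Pre_get_next_tok input pos) := by
  unfold Pre_get_next_tok; infer_instance

def pvWitness_get_next_tok : String × Int := ("a b", 0)

-- On -len(input) ≤ pos < 0 with a delimiter present in input, A's negative-index wraparound
-- returns a NEGATIVE position (or rescans the prefix after reaching index 0); B returns the
-- non-negative index of the first delimiter at or after len(input)+pos, or -1, which is the
-- intended value for a position-returning scanner.
def D_get_next_tok (input : String) (pos : Int) : Prop :=
  pos < 0 ∧ -(input.toList.length : Int) ≤ pos ∧
    (PySem.Str.isIn " " input || PySem.Str.isIn "\n" input ||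
     PySem.Str.isIn ")" input || PySem.Str.isIn ";" input) = true
instance (input : String) (pos : Int) : Decidable (D_get_next_tok input pos) := by
  unfold D_get_next_tok; infer_instance

def Spec_get_next_tok (input : String) (pos : Int) (out : Int) : Prop :=
  ¬ D_get_next_tok input pos → out = get_next_tok_alt input pos
instance (input : String) (pos : Int) (out : Int) : Decidable (Spec_get_next_tok input pos out) := by
  unfold Spec_get_next_tok; infer_instance

def pvDiffWitness_get_next_tok : String × Int := (") ", -2)
def pvDiffWitnessOut_get_next_tok : Int × Int := (-2, 0)

-- ===== CLAIM (what is proved, stated in full; the proofs are below) =====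
def Claim_unchanged_get_next_tok : Prop := ∀ (input : String) (pos : Int), Dom_get_next_tok input pos → Pre_get_next_tok input pos → Spec_get_next_tok input pos (get_next_tok input pos)
def Claim_changed_get_next_tok : Prop := Dom_get_next_tok (pvDiffWitness_get_next_tok.1) (pvDiffWitness_get_next_tok.2) ∧ Pre_get_next_tok (pvDiffWitness_get_next_tok.1) (pvDiffWitness_get_next_tok.2) ∧ D_get_next_tok (pvDiffWitness_get_next_tok.1) (pvDiffWitness_get_next_tok.2) ∧ get_next_tok (pvDiffWitness_get_next_tok.1) (pvDiffWitness_get_next_tok.2) = pvDiffWitnessOut_get_next_tok.1 ∧ get_next_tok_alt (pvDiffWitness_get_next_tok.1) (pvDiffWitness_get_next_tok.2) = pvDiffWitnessOut_get_next_tok.2 ∧ pvDiffWitnessOut_get_next_tok.1 ≠ pvDiffWitnessOut_get_next_tok.2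
def Claim_exact_get_next_tok : Prop := ∀ (input : String) (pos : Int), Dom_get_next_tok input pos → Pre_get_next_tok input pos → D_get_next_tok input pos → get_next_tok input pos ≠ get_next_tok_alt input pos

-- ===== LEMMAS AND PROOFS =====

-- the delimiter test, as A's inner for-loop computes it
def pvIsDelim (c : Char) : Bool := pvWhiteSpace.any (fun i => c == i)

-- B's value as a function of the clamped natural start index (proof-only helper)
def pvBCore (cs : List Char) (k : Nat) : Int :=
  match PySem.List.min?
      ((pvWhiteSpace.map (fun d => PySem.Chars.findFrom cs [d] (k : Int) none)).filter
        (fun p => p != -1)) id with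
  | some m => m
  | none => -1

theorem pv_delim_iff (c : Char) : pvIsDelim c = true ↔ c ∈ pvWhiteSpace := by
  unfold pvIsDelim
  rw [List.any_eq_true]
  constructor
  · rintro ⟨x, hx, he⟩; rw [show c = x from by simpa using he]; exact hx
  · intro h; exact ⟨c, h, by simp⟩

theorem pv_not_delim_if {c : Char} (h : pvIsDelim c = false) :
    ¬ (pvIsDelim c = true) := by simp [h]

theorem pv_singleton_prefix (d : Char) (u : List Char) : [d] <+: u ↔ u.head? = some d := by
  cases u <;> simp [List.cons_prefix_cons, eq_comm]

theorem pv_singleton_infix (d : Char) (t : List Char) : [d] <:+: t ↔ d ∈ t := by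
  constructor
  · intro h; exact h.mem (by simp)
  · intro h; obtain ⟨s, t', rfl⟩ := List.append_of_mem h; exact ⟨s, t', by simp⟩

theorem pv_find_char_some (t : List Char) (d : Char) (h : PySem.Chars.find t [d] ≠ -1) :
    0 ≤ PySem.Chars.find t [d] ∧
    t[(PySem.Chars.find t [d]).toNat]? = some d ∧
    ∀ i < (PySem.Chars.find t [d]).toNat, t[i]? ≠ some d := by
  have h0 : 0 ≤ PySem.Chars.find t [d] := by
    have := PySem.Chars.neg_one_le_find t [d]; omega
  obtain ⟨h1, h2⟩ := PySem.Chars.find_spec h0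
  refine ⟨h0, ?_, ?_⟩
  · rw [← List.head?_drop]; exact (pv_singleton_prefix d _).mp h1
  · intro i hi hc
    exact h2 i hi ((pv_singleton_prefix d _).mpr (by rw [List.head?_drop]; exact hc))

-- A-side: indexing helpers
theorem pv_pyGet?_nat (cs : List Char) (k : Nat) (hk : k < cs.length) :
    PySem.List.pyGet? cs (k : Int) = some (cs.getD k ' ') := by
  simp [PySem.List.pyGet?, PySem.List.pyIdx?, hk, List.getD_eq_getElem?_getD]

theorem pv_pyGet?_neg (cs : List Char) (pos : Int) (h1 : -(cs.length : Int) ≤ pos) (h2 : pos < 0) :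
    PySem.List.pyGet? cs pos = some (cs.getD (pos + cs.length).toNat ' ') := by
  have hk : (pos + cs.length).toNat < cs.length := by omega
  simp [PySem.List.pyGet?, PySem.List.pyIdx?, h2.not_ge, List.getD_eq_getElem?_getD, h1]
  have he : cs.length - (-pos).toNat = (pos + cs.length).toNat := by omega
  rw [he, List.getElem?_eq_getElem hk]
  simp

theorem pvALoop_step (cs : List Char) (pos : Int) (c : Char)
    (hlt : pos < (cs.length : Int)) (hget : PySem.List.pyGet? cs pos = some c) :
    pvALoop cs pos = if pvIsDelim c then pos else pvALoop cs (pos + 1) := by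
  rw [pvALoop, dif_pos hlt, hget]; rfl

-- A's loop from a natural index: stops at the first delimiter
theorem pvALoop_stop (cs : List Char) (k j : Nat) (hj : j < cs.length) (hkj : k ≤ j)
    (hd : pvIsDelim (cs.getD j ' ') = true)
    (hmin : ∀ i, k ≤ i → i < j → pvIsDelim (cs.getD i ' ') = false) :
    pvALoop cs (k : Int) = (j : Int) := by
  induction hn : j - k generalizing k with
  | zero =>
    have hkj' : k = j := by omega
    subst hkj'
    rw [pvALoop_step cs k (cs.getD k ' ') (by exact_mod_cast hj) (pv_pyGet?_nat cs k hj), if_pos hd]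
  | succ m ih =>
    have hkn : k < cs.length := by omega
    rw [pvALoop_step cs k (cs.getD k ' ') (by exact_mod_cast hkn) (pv_pyGet?_nat cs k hkn),
      if_neg (pv_not_delim_if (hmin k le_rfl (by omega)))]
    have : ((k : Int) + 1) = ((k+1 : Nat) : Int) := by push_cast; ring
    rw [this]
    exact ih (k+1) (by omega) (fun i h1 h2 => hmin i (by omega) h2) (by omega)

theorem pvALoop_none (cs : List Char) (k : Nat)
    (h : ∀ i, k ≤ i → i < cs.length → pvIsDelim (cs.getD i ' ') = false) :
    pvALoop cs (k : Int) = -1 := by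
  induction hn : cs.length - k generalizing k with
  | zero =>
    rw [pvALoop, dif_neg (by omega)]
  | succ m ih =>
    have hkn : k < cs.length := by omega
    rw [pvALoop_step cs k (cs.getD k ' ') (by exact_mod_cast hkn) (pv_pyGet?_nat cs k hkn),
      if_neg (pv_not_delim_if (h k le_rfl hkn))]
    have : ((k : Int) + 1) = ((k+1 : Nat) : Int) := by push_cast; ring
    rw [this]
    exact ih (k+1) (fun i h1 h2 => h i (by omega) h2) (by omega)

-- A's loop from a negative index, no delimiter in the wrapped suffix: falls through to 0
theorem pvALoop_neg_none (cs : List Char) (pos : Int)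
    (h1 : -(cs.length : Int) ≤ pos) (h2 : pos < 0)
    (h : ∀ i, (pos + cs.length).toNat ≤ i → i < cs.length → pvIsDelim (cs.getD i ' ') = false) :
    pvALoop cs pos = pvALoop cs 0 := by
  induction hn : (-pos).toNat generalizing pos with
  | zero => omega
  | succ m ih =>
    have hm : (pos + cs.length).toNat < cs.length := by omega
    rw [pvALoop_step cs pos _ (by omega) (pv_pyGet?_neg cs pos h1 h2),
      if_neg (pv_not_delim_if (h _ le_rfl hm))]
    by_cases hz : pos + 1 = 0
    · rw [hz]
    · exact ih (pos+1) (by omega) (by omega)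
        (fun i hi1 hi2 => h i (by omega) hi2) (by omega)

-- A's loop from a negative index, first wrapped delimiter at j: returns j - len (negative)
theorem pvALoop_neg_hit (cs : List Char) (pos : Int) (j : Nat)
    (h1 : -(cs.length : Int) ≤ pos) (h2 : pos < 0)
    (hj : j < cs.length) (hkj : (pos + cs.length).toNat ≤ j)
    (hd : pvIsDelim (cs.getD j ' ') = true)
    (hmin : ∀ i, (pos + cs.length).toNat ≤ i → i < j → pvIsDelim (cs.getD i ' ') = false) :
    pvALoop cs pos = (j : Int) - cs.length := by
  induction hn : (-pos).toNat generalizing pos with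
  | zero => omega
  | succ m ih =>
    by_cases he : (pos + cs.length).toNat = j
    · rw [pvALoop_step cs pos _ (by omega) (pv_pyGet?_neg cs pos h1 h2), he, if_pos hd]
      omega
    · have hm : (pos + cs.length).toNat < cs.length := by omega
      rw [pvALoop_step cs pos _ (by omega) (pv_pyGet?_neg cs pos h1 h2),
        if_neg (pv_not_delim_if (hmin _ le_rfl (by omega)))]
      exact ih (pos+1) (by omega) (by omega) (by omega)
        (fun i hi1 hi2 => hmin i (by omega) hi2) (by omega)

-- B-side: a non-(-1) findFrom from a natural start points at the first occurrence
theorem pv_findFrom_of_mem (cs : List Char) (k : Nat) (hk : k ≤ cs.length) (d : Char)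
    (h : PySem.Chars.findFrom cs [d] (k : Int) none ≠ -1) :
    ∃ j : Nat, PySem.Chars.findFrom cs [d] (k : Int) none = (j : Int) ∧ k ≤ j ∧ j < cs.length ∧
      cs[j]? = some d ∧ ∀ i, k ≤ i → i < j → cs[i]? ≠ some d := by
  rw [PySem.Chars.findFrom_natCast cs [d] k hk] at h ⊢
  by_cases hr : PySem.Chars.find (cs.drop k) [d] = -1
  · simp [hr] at h
  · obtain ⟨h0, hat, hbef⟩ := pv_find_char_some _ d hr
    set r := PySem.Chars.find (cs.drop k) [d] with hrdef
    refine ⟨k + r.toNat, ?_, by omega, ?_, ?_, ?_⟩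
    · split_ifs <;> omega
    · have := List.getElem?_drop (xs := cs) (i := k) (j := r.toNat)
      rw [this] at hat
      by_contra hge
      rw [List.getElem?_eq_none (by omega)] at hat
      cases hat
    · rw [← List.getElem?_drop]; exact hat
    · intro i hki hij hci
      have : (cs.drop k)[i - k]? = some d := by
        rw [List.getElem?_drop]; rw [show k + (i - k) = i by omega]; exact hci
      exact hbef (i - k) (by omega) this

theorem pvBCore_none (cs : List Char) (k : Nat) (hk : k ≤ cs.length)
    (h : ∀ i, k ≤ i → i < cs.length → pvIsDelim (cs.getD i ' ') = false) :
    pvBCore cs k = -1 := by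
  have hf : ∀ d ∈ pvWhiteSpace, PySem.Chars.findFrom cs [d] (k : Int) none = -1 := by
    intro d hd
    by_contra hne
    obtain ⟨j, _, hkj, hjn, hat, _⟩ := pv_findFrom_of_mem cs k hk d hne
    have hgd : cs.getD j ' ' = d := by
      rw [List.getD_eq_getElem?_getD, hat]; rfl
    have : pvIsDelim (cs.getD j ' ') = true := by
      rw [hgd]; exact (pv_delim_iff d).mpr hd
    rw [h j hkj hjn] at this; exact Bool.false_ne_true this
  have hempty : ((pvWhiteSpace.map (fun d => PySem.Chars.findFrom cs [d] (k : Int) none)).filter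
      (fun p => p != -1)) = [] := by
    rw [List.filter_eq_nil_iff]
    intro x hx
    obtain ⟨d, hd, rfl⟩ := List.mem_map.mp hx
    simp [hf d hd]
  rw [pvBCore, hempty]
  rfl

theorem pvBCore_hit (cs : List Char) (k j : Nat) (hk : k ≤ cs.length) (hj : j < cs.length)
    (hkj : k ≤ j) (hd : pvIsDelim (cs.getD j ' ') = true)
    (hmin : ∀ i, k ≤ i → i < j → pvIsDelim (cs.getD i ' ') = false) :
    pvBCore cs k = (j : Int) := by
  have hjget : cs[j]? = some (cs.getD j ' ') := by
    rw [List.getD_eq_getElem?_getD, List.getElem?_eq_getElem hj]; rfl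
  set d0 := cs.getD j ' ' with hd0
  have hd0mem : d0 ∈ pvWhiteSpace := (pv_delim_iff d0).mp hd
  set hits := ((pvWhiteSpace.map (fun d => PySem.Chars.findFrom cs [d] (k : Int) none)).filter
      (fun p => p != -1)) with hhits
  -- every hit is ≥ j
  have hlb : ∀ x ∈ hits, (j : Int) ≤ x := by
    intro x hx
    rw [hhits, List.mem_filter] at hx
    obtain ⟨hxm, hxne⟩ := hx
    obtain ⟨d, hdm, rfl⟩ := List.mem_map.mp hxm
    have hne : PySem.Chars.findFrom cs [d] (k : Int) none ≠ -1 := by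
      intro hc; rw [hc] at hxne; simp at hxne
    obtain ⟨j', hval, hkj', hj'n, hat', _⟩ := pv_findFrom_of_mem cs k hk d hne
    rw [hval]
    by_contra hlt
    have hj'j : j' < j := by omega
    have : pvIsDelim (cs.getD j' ' ') = true := by
      have : cs.getD j' ' ' = d := by rw [List.getD_eq_getElem?_getD, hat']; rfl
      rw [this]; exact (pv_delim_iff d).mpr hdm
    rw [hmin j' hkj' hj'j] at this; exact Bool.false_ne_true this
  -- j itself is a hit (via the delimiter d0 standing at j)
  have hjhit : (j : Int) ∈ hits := by
    have hne : PySem.Chars.findFrom cs [d0] (k : Int) none ≠ -1 := by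
      rw [PySem.Chars.findFrom_natCast cs [d0] k hk]
      have hmem : d0 ∈ cs.drop k := by
        have : (cs.drop k)[j - k]? = some d0 := by
          rw [List.getElem?_drop, show k + (j - k) = j by omega]; exact hjget
        exact List.mem_of_getElem? this
      have : PySem.Chars.find (cs.drop k) [d0] ≠ -1 := by
        rw [Ne, PySem.Chars.find_eq_neg_one_iff, pv_singleton_infix]; simpa using hmem
      simp [this]
      have h0 : 0 ≤ PySem.Chars.find (cs.drop k) [d0] := by
        have := PySem.Chars.neg_one_le_find (cs.drop k) [d0]; omega
      omega
    obtain ⟨j', hval, hkj', hj'n, hat', hbef'⟩ := pv_findFrom_of_mem cs k hk d0 hne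
    have hjj' : j' = j := by
      by_cases hlt : j' < j
      · exfalso
        have : pvIsDelim (cs.getD j' ' ') = true := by
          have : cs.getD j' ' ' = d0 := by rw [List.getD_eq_getElem?_getD, hat']; rfl
          rw [this]; exact (pv_delim_iff d0).mpr hd0mem
        rw [hmin j' hkj' hlt] at this; exact Bool.false_ne_true this
      · by_cases hgt : j < j'
        · exact absurd hjget (hbef' j hkj hgt)
        · omega
    rw [hhits, List.mem_filter]
    constructor
    · exact List.mem_map.mpr ⟨d0, hd0mem, by rw [hval, hjj']⟩
    · simp
  -- the minimum of the hits is j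
  rw [pvBCore, ← hhits]
  cases hmq : PySem.List.min? hits id with
  | none => exact absurd hjhit (by rw [(PySem.List.min?_eq_none_iff hits id).mp hmq]; simp)
  | some m =>
    have h1 : (j : Int) ≤ m := hlb m (PySem.List.min?_mem hmq)
    have h2 : (m : Int) ≤ (j : Int) := PySem.List.min?_isMin hmq _ hjhit
    simp only []
    omega

-- get_next_tok_alt reduces to pvBCore at the clamped start index
theorem pv_findFrom_neg (cs sub : List Char) (pos : Int)
    (h1 : -(cs.length : Int) ≤ pos) (h2 : pos < 0) :
    PySem.Chars.findFrom cs sub pos none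
      = PySem.Chars.findFrom cs sub (((pos + cs.length).toNat : Nat) : Int) none := by
  have hc : (((pos + (cs.length : Int)).toNat : Nat) : Int) = pos + cs.length := by omega
  rw [hc]
  simp only [PySem.Chars.findFrom]
  split_ifs <;> first | rfl | omega

theorem pv_findFrom_big (cs sub : List Char) (pos : Int) (h : (cs.length : Int) < pos) :
    PySem.Chars.findFrom cs sub pos none = -1 := by
  simp only [PySem.Chars.findFrom]
  split_ifs <;> first | rfl | omega

theorem pv_alt_eq_core (input : String) (pos : Int) (k : Nat)
    (hcast : pos = (k : Int)) :
    get_next_tok_alt input pos = pvBCore input.toList k := by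
  subst hcast
  rfl

theorem pv_alt_eq_core_neg (input : String) (pos : Int)
    (h1 : -(input.toList.length : Int) ≤ pos) (h2 : pos < 0) :
    get_next_tok_alt input pos = pvBCore input.toList (pos + input.toList.length).toNat := by
  rw [get_next_tok_alt, pvBCore]
  simp only [PySem.Str.findFrom_eq]
  have hmk : ∀ d : Char, (String.ofList [d]).toList = [d] := fun d => String.toList_ofList
  simp only [hmk]
  have : ∀ d : Char, PySem.Chars.findFrom input.toList [d] pos none
      = PySem.Chars.findFrom input.toList [d] (((pos + input.toList.length).toNat : Nat) : Int) none :=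
    fun d => pv_findFrom_neg input.toList [d] pos h1 h2
  simp only [this]
  rfl

theorem pv_alt_big (input : String) (pos : Int) (h : (input.toList.length : Int) < pos) :
    get_next_tok_alt input pos = -1 := by
  rw [get_next_tok_alt]
  simp only [PySem.Str.findFrom_eq]
  have hmk : ∀ d : Char, (String.ofList [d]).toList = [d] := fun d => String.toList_ofList
  simp only [hmk]
  have : ∀ d : Char, PySem.Chars.findFrom input.toList [d] pos none = -1 :=
    fun d => pv_findFrom_big input.toList [d] pos h
  simp only [this]
  rfl

-- no delimiter anywhere in the string: every position fails the delimiter test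
theorem pv_no_delim (input : String)
    (hor : (PySem.Str.isIn " " input || PySem.Str.isIn "\n" input ||
            PySem.Str.isIn ")" input || PySem.Str.isIn ";" input) = false) :
    ∀ i, pvIsDelim (input.toList.getD i ' ') = false ∨ ¬ i < input.toList.length := by
  intro i
  by_cases hi : i < input.toList.length
  · left
    by_contra hdel
    have hdel' : pvIsDelim (input.toList.getD i ' ') = true := by
      cases hx : pvIsDelim (input.toList.getD i ' ') with
      | true => rfl
      | false => exact absurd hx hdel
    have hmemw := (pv_delim_iff _).mp hdel'
    have hmemc : input.toList.getD i ' ' ∈ input.toList := by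
      rw [List.getD_eq_getElem?_getD, List.getElem?_eq_getElem hi]
      exact List.getElem_mem hi
    simp only [Bool.or_eq_false_iff] at hor
    obtain ⟨⟨⟨h1, h2⟩, h3⟩, h4⟩ := hor
    have hinf : ∀ (d : Char) (s : String), d ∈ input.toList → s.toList = [d] →
        PySem.Str.isIn s input = false → False := by
      intro d s hmem hs hfalse
      have : PySem.Str.isIn s input = true := by
        rw [PySem.Str.isIn_iff_infix, hs, pv_singleton_infix]; exact hmem
      rw [hfalse] at this; exact Bool.false_ne_true this
    have hmemw' : input.toList.getD i ' ' = ' ' ∨ input.toList.getD i ' ' = '\n' ∨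
        input.toList.getD i ' ' = ')' ∨ input.toList.getD i ' ' = ';' := by
      simpa [pvWhiteSpace] using hmemw
    rcases hmemw' with h | h | h | h <;> rw [h] at hmemc
    · exact hinf ' ' " " hmemc rfl h1
    · exact hinf '\n' "\n" hmemc rfl h2
    · exact hinf ')' ")" hmemc rfl h3
    · exact hinf ';' ";" hmemc rfl h4
  · right; exact hi

-- ===== VERDICT (by name: the statement is the Claim_ definition above) =====
theorem get_next_tok_spec : Claim_unchanged_get_next_tok := by
  intro input pos _hdom hpre hnD
  unfold Pre_get_next_tok at hpre
  unfold get_next_tok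
  by_cases hneg : pos < 0
  · -- negative pos outside D_: no delimiter occurs in the input at all
    have hor : (PySem.Str.isIn " " input || PySem.Str.isIn "\n" input ||
        PySem.Str.isIn ")" input || PySem.Str.isIn ";" input) = false := by
      cases hx : (PySem.Str.isIn " " input || PySem.Str.isIn "\n" input ||
          PySem.Str.isIn ")" input || PySem.Str.isIn ";" input) with
      | false => rfl
      | true => exact absurd (And.intro hneg (And.intro hpre hx)) hnD
    have hall : ∀ i, i < input.toList.length → pvIsDelim (input.toList.getD i ' ') = false := by
      intro i hi
      rcases pv_no_delim input hor i with h | h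
      · exact h
      · exact absurd hi h
    rw [pvALoop_neg_none input.toList pos hpre hneg (fun i _ hi => hall i hi)]
    have hA : pvALoop input.toList ((0 : Nat) : Int) = -1 :=
      pvALoop_none input.toList 0 (fun i _ hi => hall i hi)
    rw [show (0 : Int) = ((0 : Nat) : Int) from rfl, hA]
    rw [pv_alt_eq_core_neg input pos hpre hneg,
      pvBCore_none input.toList _ (by omega) (fun i _ hi => hall i hi)]
  · -- pos ≥ 0
    by_cases hbig : (input.toList.length : Int) < pos
    · rw [pvALoop, dif_neg (by omega), pv_alt_big input pos hbig]
    · have hkeq : ((pos.toNat : Nat) : Int) = pos := by omega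
      have hkn : pos.toNat ≤ input.toList.length := by omega
      rw [← hkeq, pv_alt_eq_core input _ pos.toNat rfl]
      by_cases hex : ∃ j, pos.toNat ≤ j ∧ j < input.toList.length ∧
          pvIsDelim (input.toList.getD j ' ') = true
      · obtain ⟨hj1, hj2, hj3⟩ := Nat.find_spec hex
        have hmin : ∀ i, pos.toNat ≤ i → i < Nat.find hex →
            pvIsDelim (input.toList.getD i ' ') = false := by
          intro i hi1 hi2
          cases hx : pvIsDelim (input.toList.getD i ' ') with
          | false => rfl
          | true => exact absurd (And.intro hi1 (And.intro (by omega) hx)) (Nat.find_min hex hi2)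
        rw [pvALoop_stop input.toList pos.toNat (Nat.find hex) hj2 hj1 hj3 hmin,
          pvBCore_hit input.toList pos.toNat (Nat.find hex) hkn hj2 hj1 hj3 hmin]
      · push_neg at hex
        have hnone : ∀ i, pos.toNat ≤ i → i < input.toList.length →
            pvIsDelim (input.toList.getD i ' ') = false := by
          intro i h1 h2
          cases hx : pvIsDelim (input.toList.getD i ' ') with
          | false => rfl
          | true => exact absurd hx (hex i h1 h2)
        rw [pvALoop_none input.toList pos.toNat hnone,
          pvBCore_none input.toList pos.toNat hkn hnone]

theorem get_next_tok_changed : Claim_changed_get_next_tok := by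
  unfold Claim_changed_get_next_tok
  refine ⟨by decide, by decide, by decide, ?_, by decide, by decide⟩
  show get_next_tok ") " (-2) = -2
  have h1 : (") " : String).toList = [')', ' '] := by decide
  unfold get_next_tok
  rw [h1, pvALoop]
  norm_num [PySem.List.pyGet?, PySem.List.pyIdx?, pvWhiteSpace]

theorem get_next_tok_tight : Claim_exact_get_next_tok := by
  intro input pos _hdom hpre hD
  obtain ⟨hneg, hge, hor⟩ := hD
  unfold get_next_tok
  -- some delimiter occurs in the input
  have hc : ∃ c ∈ pvWhiteSpace, c ∈ input.toList := by
    have hor' : PySem.Str.isIn " " input = true ∨ PySem.Str.isIn "\n" input = true ∨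
        PySem.Str.isIn ")" input = true ∨ PySem.Str.isIn ";" input = true := by
      simpa [Bool.or_eq_true, or_assoc] using hor
    have hone : ∀ (d : Char) (s : String), s.toList = [d] → PySem.Str.isIn s input = true →
        d ∈ input.toList := by
      intro d s hs hin
      rw [PySem.Str.isIn_iff_infix, hs, pv_singleton_infix] at hin
      exact hin
    rcases hor' with h | h | h | h
    · exact ⟨' ', by simp [pvWhiteSpace], hone ' ' " " rfl h⟩
    · exact ⟨'\n', by simp [pvWhiteSpace], hone '\n' "\n" rfl h⟩
    · exact ⟨')', by simp [pvWhiteSpace], hone ')' ")" rfl h⟩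
    · exact ⟨';', by simp [pvWhiteSpace], hone ';' ";" rfl h⟩
  obtain ⟨c, hcw, hcl⟩ := hc
  have hn1 : 1 ≤ input.toList.length := List.length_pos_of_mem hcl
  have hm : (pos + input.toList.length).toNat ≤ input.toList.length := by omega
  rw [pv_alt_eq_core_neg input pos hge hneg]
  by_cases hex : ∃ j, (pos + input.toList.length).toNat ≤ j ∧ j < input.toList.length ∧
      pvIsDelim (input.toList.getD j ' ') = true
  · -- delimiter in the wrapped suffix: A returns a negative position, B the true index
    obtain ⟨hj1, hj2, hj3⟩ := Nat.find_spec hex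
    have hmin : ∀ i, (pos + input.toList.length).toNat ≤ i → i < Nat.find hex →
        pvIsDelim (input.toList.getD i ' ') = false := by
      intro i hi1 hi2
      cases hx : pvIsDelim (input.toList.getD i ' ') with
      | false => rfl
      | true => exact absurd (And.intro hi1 (And.intro (by omega) hx)) (Nat.find_min hex hi2)
    rw [pvALoop_neg_hit input.toList pos (Nat.find hex) hge hneg hj2 hj1 hj3 hmin,
      pvBCore_hit input.toList _ (Nat.find hex) hm hj2 hj1 hj3 hmin]
    intro h
    omega
  · -- no delimiter in the wrapped suffix: B returns -1, A rescans from 0 and finds one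
    push_neg at hex
    have hnone : ∀ i, (pos + input.toList.length).toNat ≤ i → i < input.toList.length →
        pvIsDelim (input.toList.getD i ' ') = false := by
      intro i h1 h2
      cases hx : pvIsDelim (input.toList.getD i ' ') with
      | false => rfl
      | true => exact absurd hx (hex i h1 h2)
    rw [pvBCore_none input.toList _ hm hnone,
      pvALoop_neg_none input.toList pos hge hneg hnone]
    have hex2 : ∃ j, 0 ≤ j ∧ j < input.toList.length ∧
        pvIsDelim (input.toList.getD j ' ') = true := by
      obtain ⟨i, hi, hgi⟩ := List.mem_iff_getElem.mp hcl
      refine ⟨i, Nat.zero_le i, hi, ?_⟩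
      have : input.toList.getD i ' ' = c := by
        rw [List.getD_eq_getElem?_getD, List.getElem?_eq_getElem hi, hgi]; rfl
      rw [this]
      exact (pv_delim_iff c).mpr hcw
    obtain ⟨hj1, hj2, hj3⟩ := Nat.find_spec hex2
    have hmin2 : ∀ i, 0 ≤ i → i < Nat.find hex2 →
        pvIsDelim (input.toList.getD i ' ') = false := by
      intro i hi1 hi2
      cases hx : pvIsDelim (input.toList.getD i ' ') with
      | false => rfl
      | true => exact absurd (And.intro hi1 (And.intro (by omega) hx)) (Nat.find_min hex2 hi2)
    rw [show (0 : Int) = ((0 : Nat) : Int) from rfl,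
      pvALoop_stop input.toList 0 (Nat.find hex2) hj2 hj1 hj3 hmin2]
    intro h
    omega
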